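-- pv_equiv track=rewrite | github.com/CCMS-UCSD/GNPS_Workflows | ms2lda_motifdb/tools/ms2lda_motifdb/lda/code/ms2lda_feature_extraction_utilities.py | reverse_corpus
-- ===== SOURCE A (Python) =====
-- def reverse_corpus(corpus):
-- 	reverse_corpus = {}
-- 	for doc,spectrum in corpus.items():
-- 		for f,_ in spectrum.items():
-- 			if not f in reverse_corpus:
-- 				reverse_corpus[f] = set()
-- 			reverse_corpus[f].add(doc)
-- 	return reverse_corpus
-- ===== SOURCE B (Python) =====
-- def reverse_corpus(corpus):
--     features = {f: None for spectrum in corpus.values() for f in spectrum}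
--     return {f: {doc for doc, spec in corpus.items() if f in spec} for f in features}
-- ===== Notes on version B (the rewrite author's own statement) =====
-- stated objective: alternative
-- what changed: Inverts the loop nesting: B first collects the set of all features across every spectrum, then builds each feature's doc-set by one comprehension scanning the documents, instead of A's single incremental pass that grows per-feature sets as it goes.
import Mathlib
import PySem

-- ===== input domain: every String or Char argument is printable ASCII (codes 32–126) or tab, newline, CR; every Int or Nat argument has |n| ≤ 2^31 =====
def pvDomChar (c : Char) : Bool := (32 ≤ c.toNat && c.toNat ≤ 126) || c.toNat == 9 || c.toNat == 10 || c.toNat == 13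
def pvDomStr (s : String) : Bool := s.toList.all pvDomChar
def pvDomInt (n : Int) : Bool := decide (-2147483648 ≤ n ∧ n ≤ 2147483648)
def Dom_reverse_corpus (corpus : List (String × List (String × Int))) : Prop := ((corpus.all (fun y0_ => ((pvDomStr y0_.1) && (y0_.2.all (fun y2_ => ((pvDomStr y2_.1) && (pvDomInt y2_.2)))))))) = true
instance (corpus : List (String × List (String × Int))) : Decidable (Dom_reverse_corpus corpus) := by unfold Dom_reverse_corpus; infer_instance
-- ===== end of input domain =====

-- B inverts the loop nesting: it first collects the ordered set of all features, then computes each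
-- feature's doc-set by scanning the documents, instead of A's single incremental pass (objective: alternative).

-- ===== PORT A =====
def reverse_corpus (corpus : List (String × List (String × Int))) : List (String × List String) :=
  (corpus.foldl (fun rc dv =>
      dv.2.foldl (fun rc fv =>
        let rc := if rc.contains fv.1 then rc else rc.insert fv.1 PySem.Set.empty
        rc.modify fv.1 PySem.Set.empty (fun s => PySem.Set.add s dv.1))
      rc)
    PySem.Dict.empty).items

-- ===== PORT B =====
def reverse_corpus_alt (corpus : List (String × List (String × Int))) : List (String × List String) :=
  let features : PySem.Set String :=
    PySem.Set.ofList (corpus.flatMap (fun dv => dv.2.map (fun fv => fv.1)))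
  features.map (fun f =>
    (f, PySem.Set.ofList
          ((corpus.filter (fun dv => dv.2.any (fun fv => fv.1 == f))).map (fun dv => dv.1))))

-- ===== PRECONDITION & SPEC =====
def Spec_reverse_corpus (corpus : List (String × List (String × Int))) (out : List (String × List String)) : Prop := out = reverse_corpus_alt corpus
instance (corpus : List (String × List (String × Int))) (out : List (String × List String)) : Decidable (Spec_reverse_corpus corpus out) := by unfold Spec_reverse_corpus; infer_instance

-- ===== CLAIM (what is proved, stated in full; the proofs are below) =====
def Claim_equal_reverse_corpus : Prop := ∀ (corpus : List (String × List (String × Int))), Dom_reverse_corpus corpus → Spec_reverse_corpus corpus (reverse_corpus corpus)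

-- ===== LEMMAS AND PROOFS =====

-- the (doc, feature) pairs of the corpus, in iteration order
def pvFlat (corpus : List (String × List (String × Int))) : List (String × String) :=
  corpus.flatMap (fun dv => dv.2.map (fun fv => (dv.1, fv.1)))

-- the flat-loop step A's inner body amounts to
def pvStep (d : PySem.Dict String (PySem.Set String)) (p : String × String) :
    PySem.Dict String (PySem.Set String) :=
  d.modify p.2 PySem.Set.empty (fun s => PySem.Set.add s p.1)

-- A's "ensure key, then add" equals a single modify with default ∅
theorem pvStep_eq (d : PySem.Dict String (PySem.Set String)) (k v : String) :
    (if d.contains k then d else d.insert k PySem.Set.empty).modify k PySem.Set.empty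
      (fun s => PySem.Set.add s v)
      = d.modify k PySem.Set.empty (fun s => PySem.Set.add s v) := by
  by_cases h : d.contains k
  · simp [h]
  · have h' : d.contains k = false := by simpa using h
    simp [h', PySem.Dict.modify, PySem.Dict.getD_insert_self, PySem.Dict.insert_insert_self,
      PySem.Dict.getD_of_not_contains, PySem.Set.add, PySem.Set.contains]

-- the nested fold of A is the fold of pvStep over the flattened pairs
theorem pvFoldA (corpus : List (String × List (String × Int)))
    (d : PySem.Dict String (PySem.Set String)) :
    corpus.foldl (fun rc dv =>
      dv.2.foldl (fun rc fv =>
        let rc := if rc.contains fv.1 then rc else rc.insert fv.1 PySem.Set.empty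
        rc.modify fv.1 PySem.Set.empty (fun s => PySem.Set.add s dv.1)) rc) d
      = (pvFlat corpus).foldl pvStep d := by
  induction corpus generalizing d with
  | nil => simp [pvFlat]
  | cons dv rest ih =>
      simp only [List.foldl_cons, pvFlat, List.flatMap_cons, List.foldl_append, List.foldl_map]
      rw [← pvFlat]
      rw [ih]
      congr 1
      induction dv.2 generalizing d with
      | nil => rfl
      | cons fv fs ih2 =>
          simp only [List.foldl_cons]
          rw [ih2, pvStep, pvStep_eq]

-- value at key f after the flat fold
theorem pvGetD (l : List (String × String)) (d : PySem.Dict String (PySem.Set String)) (f : String) :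
    (l.foldl pvStep d).getD f PySem.Set.empty
      = PySem.Set.update (d.getD f PySem.Set.empty) ((l.filter (fun p => p.2 == f)).map (·.1)) := by
  induction l generalizing d with
  | nil => simp [PySem.Set.update]
  | cons p rest ih =>
      simp only [List.foldl_cons, List.filter_cons]
      rw [ih]
      by_cases h : p.2 = f
      · simp [h, pvStep, PySem.Set.update_cons]
      · have hb : (p.2 == f) = false := by simp [h]
        simp [hb, pvStep, PySem.Dict.getD_modify, Ne.symm h]

-- the filtered-doc lists of the flat view and of B's doc-level view build the same set
theorem pvBlock (l : List (String × Int)) (dc f : String) :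
    ((l.map (fun fv => (dc, fv.1))).filter (fun p => p.2 == f)).map (·.1)
      = List.replicate (l.countP (fun fv => fv.1 == f)) dc := by
  induction l with
  | nil => rfl
  | cons fv fs ih =>
      by_cases h : fv.1 = f
      · simp [h, List.replicate_succ, ih]
      · simp [h, ih]

theorem pvAddIdem (s : PySem.Set String) (x : String) :
    PySem.Set.add (PySem.Set.add s x) x = PySem.Set.add s x := by
  by_cases h : x ∈ s <;>
    simp [PySem.Set.add, PySem.Set.contains, h]

theorem pvUpdateRep (n : Nat) (x : String) (s : PySem.Set String) (hn : 0 < n) :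
    PySem.Set.update s (List.replicate n x) = PySem.Set.add s x := by
  induction n generalizing s with
  | zero => omega
  | succ m ih =>
      rcases Nat.eq_zero_or_pos m with hm | hm
      · subst hm; simp [PySem.Set.update]
      · simp only [List.replicate_succ, PySem.Set.update_cons]
        rw [ih _ hm]
        exact pvAddIdem s x

theorem pvDocs (corpus : List (String × List (String × Int))) (f : String) (s : PySem.Set String) :
    PySem.Set.update s (((pvFlat corpus).filter (fun p => p.2 == f)).map (·.1))
      = PySem.Set.update s ((corpus.filter (fun dv => dv.2.any (fun fv => fv.1 == f))).map (fun dv => dv.1)) := by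
  induction corpus generalizing s with
  | nil => rfl
  | cons dv rest ih =>
      simp only [pvFlat, List.flatMap_cons, List.filter_append, List.map_append, List.filter_cons]
      rw [← pvFlat, PySem.Set.update_append, pvBlock, ih]
      by_cases h : dv.2.any (fun fv => fv.1 == f)
      · have hpos : 0 < dv.2.countP (fun fv => fv.1 == f) := by
          rw [List.countP_pos_iff]; simpa [List.any_eq_true] using h
        rw [pvUpdateRep _ _ _ hpos]
        simp [h, PySem.Set.update_cons]
      · have hz : dv.2.countP (fun fv => fv.1 == f) = 0 := by
          rw [List.countP_eq_zero]
          intro a ha hc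
          exact h (List.any_eq_true.2 ⟨a, ha, hc⟩)
        simp [h, hz]

-- keys of the flat fold, from empty, are the ordered feature set
theorem pvKeys (l : List (String × String)) :
    (l.foldl pvStep PySem.Dict.empty).keys = PySem.Set.ofList (l.map (·.2)) := by
  have := PySem.Dict.keys_foldl_modify_key l (fun p => p.2) PySem.Set.empty
    (fun _d p => fun s => PySem.Set.add s p.1) PySem.Dict.empty
  simpa [pvStep, PySem.Dict.keys_empty, PySem.Set.update_nil_left] using this

theorem pvNodup (l : List (String × String)) :
    (l.foldl pvStep PySem.Dict.empty).keys.Nodup := by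
  have := PySem.Dict.nodup_keys_foldl_modify_key l (fun p => p.2) PySem.Set.empty
    (fun _d p => fun s => PySem.Set.add s p.1) PySem.Dict.empty (by simp)
  simpa [pvStep] using this

-- ===== VERDICT (by name: the statement is the Claim_ definition above) =====
theorem reverse_corpus_spec : Claim_equal_reverse_corpus := by
  intro corpus _
  unfold Spec_reverse_corpus reverse_corpus reverse_corpus_alt
  rw [pvFoldA]
  rw [PySem.Dict.items_eq_map_keys _ (pvNodup (pvFlat corpus)) PySem.Set.empty]
  rw [pvKeys]
  have hfeat : PySem.Set.ofList ((pvFlat corpus).map (·.2))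
      = PySem.Set.ofList (corpus.flatMap (fun dv => dv.2.map (fun fv => fv.1))) := by
    simp [pvFlat, List.map_flatMap, Function.comp_def]
  rw [hfeat]
  apply List.map_congr_left
  intro f _
  congr 1
  rw [pvGetD, PySem.Dict.getD_empty, pvDocs]
  simp [PySem.Set.update_nil_left]
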